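-- pv_equiv track=rewrite | github.com/RoxanaSandu21/Python2023_Sandu_Roxana_Alexandra_I3B1 | Lab2/main.py | find_seats_with_blocked_view
-- ===== SOURCE A (Python) =====
-- def find_seats_with_blocked_view(matrix):
--     blocked_seats = []
--     num_rows = len(matrix)
--     if num_rows > 0:
--         num_cols = len(matrix[0])
--     else:
--         num_cols = 0
--     for col in range(num_cols):
--         for row in range(1, num_rows):
--             spectator_height = matrix[row][col]
--             can_see_game = True
--             for prev_row in range(row):
--                 if matrix[prev_row][col] >= spectator_height:
--                     can_see_game = False
--                     break
--             if not can_see_game: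
--                 blocked_seats.append((row, col))
--     return blocked_seats
-- ===== SOURCE B (Python) =====
-- def find_seats_with_blocked_view(matrix):
--     blocked_seats = []
--     if not matrix:
--         return blocked_seats
--     num_cols = len(matrix[0])
--     for col in range(num_cols):
--         running_max = matrix[0][col]
--         for row in range(1, len(matrix)):
--             height = matrix[row][col]
--             if height <= running_max:
--                 blocked_seats.append((row, col))
--             else:
--                 running_max = height
--     return blocked_seats
-- ===== Notes on version B (the rewrite author's own statement) =====
-- stated objective: faster
-- what changed: Replaced the inner scan over all previous rows (per column, per row) by a running per-column maximum carried through a single pass over the rows, so the quadratic-in-rows rescan disappears.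
import Mathlib
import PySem

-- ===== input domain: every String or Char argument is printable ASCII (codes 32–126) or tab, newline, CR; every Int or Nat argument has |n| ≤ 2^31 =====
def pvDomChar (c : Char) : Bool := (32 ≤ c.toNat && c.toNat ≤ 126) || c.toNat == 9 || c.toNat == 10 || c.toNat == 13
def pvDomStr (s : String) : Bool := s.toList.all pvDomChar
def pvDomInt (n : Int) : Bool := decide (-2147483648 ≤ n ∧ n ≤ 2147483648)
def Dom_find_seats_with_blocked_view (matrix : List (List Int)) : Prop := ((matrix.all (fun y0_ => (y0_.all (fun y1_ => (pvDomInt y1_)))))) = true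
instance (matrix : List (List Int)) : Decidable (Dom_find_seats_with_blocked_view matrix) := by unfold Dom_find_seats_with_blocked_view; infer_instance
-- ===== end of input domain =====

-- B replaces A's rescan of all previous rows by a running per-column maximum (one pass per column): asymptotically faster, same results.

-- ===== PORT A =====
def find_seats_with_blocked_view (matrix : List (List Int)) : List (Int × Int) :=
  let num_rows : Int := (matrix.length : Int)
  let num_cols : Int := if num_rows > 0 then ((PySem.List.pyGetD matrix 0 []).length : Int) else 0
  (PySem.List.pyRange 0 num_cols 1).foldl (fun blocked_seats col =>
    (PySem.List.pyRange 1 num_rows 1).foldl (fun blocked_seats row =>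
      let spectator_height := PySem.List.pyGetD (PySem.List.pyGetD matrix row []) col 0
      let can_see_game := (PySem.List.pyRange 0 row 1).foldl (fun can prev_row =>
        if can then
          (if PySem.List.pyGetD (PySem.List.pyGetD matrix prev_row []) col 0 ≥ spectator_height then false else can)
        else can) true
      if !can_see_game then blocked_seats ++ [(row, col)] else blocked_seats) blocked_seats) []

-- ===== PORT B =====
def find_seats_with_blocked_view_alt (matrix : List (List Int)) : List (Int × Int) :=
  match matrix with
  | [] => []
  | first :: _ =>
    (PySem.List.pyRange 0 (first.length : Int) 1).foldl (fun blocked_seats col =>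
      ((PySem.List.pyRange 1 (matrix.length : Int) 1).foldl
        (fun st row =>
          let height := PySem.List.pyGetD (PySem.List.pyGetD matrix row []) col 0
          if height ≤ st.1 then (st.1, st.2 ++ [(row, col)]) else (height, st.2))
        (PySem.List.pyGetD first col 0, blocked_seats)).2) []

-- ===== PRECONDITION & SPEC =====
-- Pre_ excludes exactly the ragged matrices on which Python A raises IndexError
-- (some row shorter than the first row, so matrix[row][col] is out of range).
def Pre_find_seats_with_blocked_view (matrix : List (List Int)) : Prop :=
  ∀ r ∈ matrix, (matrix.headD []).length ≤ r.length
instance (matrix : List (List Int)) : Decidable (Pre_find_seats_with_blocked_view matrix) := by unfold Pre_find_seats_with_blocked_view; infer_instance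
def pvWitness_find_seats_with_blocked_view : List (List Int) := [[1, 2], [3, 1], [2, 5]]

def Spec_find_seats_with_blocked_view (matrix : List (List Int)) (out : List (Int × Int)) : Prop := out = find_seats_with_blocked_view_alt matrix
instance (matrix : List (List Int)) (out : List (Int × Int)) : Decidable (Spec_find_seats_with_blocked_view matrix out) := by unfold Spec_find_seats_with_blocked_view; infer_instance

-- ===== CLAIM (what is proved, stated in full; the proofs are below) =====
def Claim_equal_find_seats_with_blocked_view : Prop := ∀ (matrix : List (List Int)), Dom_find_seats_with_blocked_view matrix → Pre_find_seats_with_blocked_view matrix → Spec_find_seats_with_blocked_view matrix (find_seats_with_blocked_view matrix)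

-- ===== LEMMAS AND PROOFS =====

-- column entry: matrix[r][col] with Python defaults (as both ports read it)
def pvG (matrix : List (List Int)) (col r : Int) : Int :=
  PySem.List.pyGetD (PySem.List.pyGetD matrix r []) col 0

-- A's inner break-loop is an `all` over the scanned prefix
theorem pv_breakfold (P : Int → Prop) [DecidablePred P] (l : List Int) (b : Bool) :
    l.foldl (fun can p => if can then (if P p then false else can) else can) b
      = (b && l.all (fun p => !decide (P p))) := by
  induction l generalizing b with
  | nil => simp
  | cons x xs ih =>
    rw [List.foldl_cons, ih]
    by_cases hq : P x <;> cases b <;> simp [hq]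

-- running max below a bound
theorem pv_foldl_max_lt (l : List Int) (init h : Int) :
    l.foldl max init < h ↔ init < h ∧ ∀ x ∈ l, x < h := by
  induction l generalizing init with
  | nil => simp
  | cons x xs ih =>
    simp only [List.foldl_cons, ih, List.mem_cons]
    constructor
    · rintro ⟨hm, hall⟩
      exact ⟨lt_of_le_of_lt (le_max_left _ _) hm,
        fun y hy => hy.elim (fun e => e ▸ lt_of_le_of_lt (le_max_right _ _) hm) (hall y)⟩
    · rintro ⟨hi, hall⟩
      exact ⟨max_lt hi (hall x (Or.inl rfl)), fun y hy => hall y (Or.inr hy)⟩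

-- core per-column equality of the two inner row loops
theorem pv_col (matrix : List (List Int)) (col : Int) (n : Nat) (hn : 1 ≤ n) :
    ∀ acc : List (Int × Int),
    (PySem.List.pyRange 1 (n : Int) 1).foldl
        (fun st row =>
          let height := pvG matrix col row
          if height ≤ st.1 then (st.1, st.2 ++ [(row, col)]) else (height, st.2))
        (pvG matrix col 0, acc)
      = ((PySem.List.pyRange 1 (n : Int) 1).foldl (fun mx r => max mx (pvG matrix col r)) (pvG matrix col 0),
         (PySem.List.pyRange 1 (n : Int) 1).foldl
           (fun blocked_seats row =>
             let spectator_height := pvG matrix col row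
             let can_see_game := (PySem.List.pyRange 0 row 1).foldl (fun can prev_row =>
               if can then
                 (if pvG matrix col prev_row ≥ spectator_height then false else can)
               else can) true
             if !can_see_game then blocked_seats ++ [(row, col)] else blocked_seats) acc) := by
  induction n, hn using Nat.le_induction with
  | base =>
    intro acc
    rw [show PySem.List.pyRange 1 ((1:Nat) : Int) 1 = [] from PySem.List.pyRange_one_eq_nil (by norm_num)]
    simp
  | succ n hn ih =>
    intro acc
    have hsplit : PySem.List.pyRange 1 ((n + 1 : Nat) : Int) 1
        = PySem.List.pyRange 1 (n : Int) 1 ++ [(n : Int)] := by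
      push_cast
      exact PySem.List.pyRange_one_succ_right (by exact_mod_cast hn)
    rw [hsplit, List.foldl_append, List.foldl_append, List.foldl_append, ih acc]
    simp only [List.foldl_cons, List.foldl_nil]
    have hRM : (List.foldl (fun mx r => max mx (pvG matrix col r)) (pvG matrix col 0)
          (PySem.List.pyRange 1 (n : Int) 1) < pvG matrix col (n : Int))
        ↔ ∀ p ∈ PySem.List.pyRange 0 (n : Int) 1, pvG matrix col p < pvG matrix col (n : Int) := by
      rw [← List.foldl_map (f := pvG matrix col) (g := max), pv_foldl_max_lt,
          PySem.List.pyRange_one_cons (show (0 : Int) < (n : Int) by exact_mod_cast hn)]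
      simp
      intro _
      exact ⟨fun h a h1 h2 => h _ a h1 h2 rfl, fun h x a h1 h2 e => e ▸ h a h1 h2⟩
    rw [pv_breakfold (fun p => pvG matrix col p ≥ pvG matrix col (n : Int))
          (PySem.List.pyRange 0 (n : Int) 1) true]
    by_cases hall : ∀ p ∈ PySem.List.pyRange 0 (n : Int) 1, pvG matrix col p < pvG matrix col (n : Int)
    · have hlt := hRM.mpr hall
      have hle : ¬ pvG matrix col (n : Int) ≤ List.foldl (fun mx r => max mx (pvG matrix col r))
          (pvG matrix col 0) (PySem.List.pyRange 1 (n : Int) 1) := not_le.mpr hlt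
      have hallb : (PySem.List.pyRange 0 (n : Int) 1).all
          (fun p => !decide (pvG matrix col p ≥ pvG matrix col (n : Int))) = true := by
        simp only [List.all_eq_true, Bool.not_eq_true', decide_eq_false_iff_not, not_le]
        exact hall
      simp [hle, hallb, max_eq_right (le_of_lt hlt)]
    · have hge : pvG matrix col (n : Int) ≤ List.foldl (fun mx r => max mx (pvG matrix col r))
          (pvG matrix col 0) (PySem.List.pyRange 1 (n : Int) 1) := not_lt.mp (fun h => hall (hRM.mp h))
      have hallb : (PySem.List.pyRange 0 (n : Int) 1).all
          (fun p => !decide (pvG matrix col p ≥ pvG matrix col (n : Int))) = false := by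
        push Not at hall
        obtain ⟨p, hp, hgep⟩ := hall
        simp only [List.all_eq_false]
        exact ⟨p, hp, by simp [hgep]⟩
      simp [hge, hallb]

-- ===== VERDICT (by name: the statement is the Claim_ definition above) =====
theorem find_seats_with_blocked_view_spec : Claim_equal_find_seats_with_blocked_view := by
  intro matrix _ _
  unfold Spec_find_seats_with_blocked_view
  cases matrix with
  | nil => decide
  | cons first rest =>
    simp only [find_seats_with_blocked_view, find_seats_with_blocked_view_alt]
    rw [if_pos (show ((first :: rest).length : Int) > 0 by simp), PySem.List.pyGetD_zero_cons]
    apply PySem.List.foldl_congr_mem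
    intro acc col _
    have h2 := congrArg Prod.snd (pv_col (first :: rest) col (first :: rest).length (by simp) acc)
    simp only [pvG, PySem.List.pyGetD_zero_cons] at h2
    exact h2.symm
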